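-- pv_equiv track=rewrite | github.com/MikaKSE/TechnicalTablePDFExtractor | handler/TableLinesHandler.py | findRightDeadEnds
-- ===== SOURCE A (Python) =====
-- def findRightDeadEnds(x_lines: list[tuple[int, int, int, int]], y_lines: list[tuple[int, int, int, int]],
--                       x_tol: int = 10, y_tol: int = 5) -> list[tuple[int, int, int, int]]:
--     dead_end_lines = []
--     for x_line in x_lines:
--         is_dead_end = True
--         for y_line in y_lines:
--
--             if 0 <= abs(x_line[2] - y_line[2]) <= x_tol and y_line[1] - y_tol <= x_line[1] <= y_line[3] + y_tol:
--                 is_dead_end = False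
--
--         if is_dead_end:
--             dead_end_lines.append(x_line)
--
--     return dead_end_lines
-- ===== SOURCE B (Python) =====
-- def findRightDeadEnds(x_lines, y_lines, x_tol=10, y_tol=5):
--     covered = [False] * len(x_lines)
--     for y in y_lines:
--         xlo, xhi = y[2] - x_tol, y[2] + x_tol
--         ylo, yhi = y[1] - y_tol, y[3] + y_tol
--         covered = [c or (xlo <= x[2] <= xhi and ylo <= x[1] <= yhi)
--                    for c, x in zip(covered, x_lines)]
--     return [x for c, x in zip(covered, x_lines) if not c]
-- ===== Notes on version B (the rewrite author's own statement) =====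
-- stated objective: alternative
-- what changed: Loop interchange: B iterates over y_lines in the outer loop, maintaining a boolean coverage mask over x_lines (condition rewritten without abs as an interval test), then filters the uncovered x_lines, instead of A's per-x_line inner scan of y_lines with a dead-end flag; the per-y bounds are computed once and the inner pass is a list comprehension, a constant-factor win.
-- outside the precondition, e.g. on findRightDeadEnds([(0, 0, 5)], [(9, 9, 100)], 10, 5): A returns [(0, 0, 5)], B raises IndexError; on findRightDeadEnds([], [(0,)], 10, 5): A returns [], B raises IndexError
import Mathlib
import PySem

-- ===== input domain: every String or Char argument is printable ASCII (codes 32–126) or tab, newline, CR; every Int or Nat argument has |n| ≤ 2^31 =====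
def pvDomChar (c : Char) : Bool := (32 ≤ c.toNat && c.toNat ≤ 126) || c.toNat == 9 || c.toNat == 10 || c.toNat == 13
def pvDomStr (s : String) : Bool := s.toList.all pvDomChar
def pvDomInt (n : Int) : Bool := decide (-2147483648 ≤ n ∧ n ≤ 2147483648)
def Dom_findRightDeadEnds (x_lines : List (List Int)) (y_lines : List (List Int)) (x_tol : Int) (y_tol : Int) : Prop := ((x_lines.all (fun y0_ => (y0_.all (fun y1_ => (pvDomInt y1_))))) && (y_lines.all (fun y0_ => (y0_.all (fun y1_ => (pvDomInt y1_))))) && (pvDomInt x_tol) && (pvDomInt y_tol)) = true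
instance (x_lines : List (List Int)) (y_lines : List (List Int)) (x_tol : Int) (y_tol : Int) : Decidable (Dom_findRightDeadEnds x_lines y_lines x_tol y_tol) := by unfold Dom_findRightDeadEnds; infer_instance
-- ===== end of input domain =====

-- B interchanges the loops: outer loop over y_lines maintains a boolean coverage mask over
-- x_lines (interval test instead of abs), then the uncovered x_lines are kept; objective:
-- alternative (same asymptotic cost, different traversal).

-- ===== PORT A =====
def findRightDeadEnds (x_lines : List (List Int)) (y_lines : List (List Int)) (x_tol : Int) (y_tol : Int) : List (List Int) :=
  x_lines.foldl (fun dead_end_lines x_line =>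
    let is_dead_end := y_lines.foldl (fun is_dead_end y_line =>
      if 0 ≤ |PySem.List.pyGetD x_line 2 0 - PySem.List.pyGetD y_line 2 0| ∧
         |PySem.List.pyGetD x_line 2 0 - PySem.List.pyGetD y_line 2 0| ≤ x_tol ∧
         PySem.List.pyGetD y_line 1 0 - y_tol ≤ PySem.List.pyGetD x_line 1 0 ∧
         PySem.List.pyGetD x_line 1 0 ≤ PySem.List.pyGetD y_line 3 0 + y_tol
      then false else is_dead_end) true
    if is_dead_end then dead_end_lines ++ [x_line] else dead_end_lines) []

-- ===== PORT B =====
def findRightDeadEnds_alt (x_lines : List (List Int)) (y_lines : List (List Int)) (x_tol : Int) (y_tol : Int) : List (List Int) :=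
  let covered := y_lines.foldl (fun covered y =>
    let xlo := PySem.List.pyGetD y 2 0 - x_tol
    let xhi := PySem.List.pyGetD y 2 0 + x_tol
    let ylo := PySem.List.pyGetD y 1 0 - y_tol
    let yhi := PySem.List.pyGetD y 3 0 + y_tol
    (covered.zip x_lines).map (fun cx =>
      cx.1 || decide (xlo ≤ PySem.List.pyGetD cx.2 2 0 ∧ PySem.List.pyGetD cx.2 2 0 ≤ xhi ∧
                      ylo ≤ PySem.List.pyGetD cx.2 1 0 ∧ PySem.List.pyGetD cx.2 1 0 ≤ yhi)))
    (List.replicate x_lines.length false)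
  (covered.zip x_lines).filterMap (fun cx => if cx.1 then none else some cx.2)

-- ===== PRECONDITION & SPEC =====
-- Pre_ excludes inputs containing a line shorter than its accessed coordinates (an x_line with
-- fewer than 3 entries, a y_line with fewer than 4): there Python A raises IndexError, except in
-- corner cases where chained-comparison short-circuiting skips the missing coordinate and A still
-- returns — B reads all four coordinates of every y_line up front and raises there.
def Pre_findRightDeadEnds (x_lines : List (List Int)) (y_lines : List (List Int)) (x_tol : Int) (y_tol : Int) : Prop :=
  (∀ l ∈ y_lines, 4 ≤ l.length) ∧ (y_lines ≠ [] → ∀ l ∈ x_lines, 3 ≤ l.length)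
instance (x_lines : List (List Int)) (y_lines : List (List Int)) (x_tol : Int) (y_tol : Int) : Decidable (Pre_findRightDeadEnds x_lines y_lines x_tol y_tol) := by unfold Pre_findRightDeadEnds; infer_instance
def pvWitness_findRightDeadEnds : List (List Int) × List (List Int) × Int × Int := ([[1, 2, 3, 4]], [[0, 0, 3, 9]], 10, 5)

def Spec_findRightDeadEnds (x_lines : List (List Int)) (y_lines : List (List Int)) (x_tol : Int) (y_tol : Int) (out : List (List Int)) : Prop := out = findRightDeadEnds_alt x_lines y_lines x_tol y_tol
instance (x_lines : List (List Int)) (y_lines : List (List Int)) (x_tol : Int) (y_tol : Int) (out : List (List Int)) : Decidable (Spec_findRightDeadEnds x_lines y_lines x_tol y_tol out) := by unfold Spec_findRightDeadEnds; infer_instance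

-- ===== CLAIM (what is proved, stated in full; the proofs are below) =====
def Claim_equal_findRightDeadEnds : Prop := ∀ (x_lines : List (List Int)) (y_lines : List (List Int)) (x_tol : Int) (y_tol : Int), Dom_findRightDeadEnds x_lines y_lines x_tol y_tol → Pre_findRightDeadEnds x_lines y_lines x_tol y_tol → Spec_findRightDeadEnds x_lines y_lines x_tol y_tol (findRightDeadEnds x_lines y_lines x_tol y_tol)

-- ===== LEMMAS AND PROOFS =====

-- the crossing test, in B's interval form
def pvHit (x_tol y_tol : Int) (y x : List Int) : Bool :=
  decide (PySem.List.pyGetD y 2 0 - x_tol ≤ PySem.List.pyGetD x 2 0 ∧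
          PySem.List.pyGetD x 2 0 ≤ PySem.List.pyGetD y 2 0 + x_tol ∧
          PySem.List.pyGetD y 1 0 - y_tol ≤ PySem.List.pyGetD x 1 0 ∧
          PySem.List.pyGetD x 1 0 ≤ PySem.List.pyGetD y 3 0 + y_tol)

-- A's abs-form test agrees with B's interval form
theorem pvHit_iff (x_tol y_tol : Int) (y x : List Int) :
    (0 ≤ |PySem.List.pyGetD x 2 0 - PySem.List.pyGetD y 2 0| ∧
     |PySem.List.pyGetD x 2 0 - PySem.List.pyGetD y 2 0| ≤ x_tol ∧
     PySem.List.pyGetD y 1 0 - y_tol ≤ PySem.List.pyGetD x 1 0 ∧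
     PySem.List.pyGetD x 1 0 ≤ PySem.List.pyGetD y 3 0 + y_tol) ↔ pvHit x_tol y_tol y x = true := by
  simp only [pvHit, decide_eq_true_eq, abs_le, abs_nonneg, true_and]
  constructor <;> intro h <;> omega

-- A's inner flag loop is "no y_line hits"
theorem pvInnerA (x_tol y_tol : Int) (x : List Int) :
    ∀ (ys : List (List Int)) (b : Bool),
      ys.foldl (fun is_dead_end y =>
        if 0 ≤ |PySem.List.pyGetD x 2 0 - PySem.List.pyGetD y 2 0| ∧
           |PySem.List.pyGetD x 2 0 - PySem.List.pyGetD y 2 0| ≤ x_tol ∧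
           PySem.List.pyGetD y 1 0 - y_tol ≤ PySem.List.pyGetD x 1 0 ∧
           PySem.List.pyGetD x 1 0 ≤ PySem.List.pyGetD y 3 0 + y_tol
        then false else is_dead_end) b
      = (b && !(ys.any (fun y => pvHit x_tol y_tol y x))) := by
  intro ys
  induction ys with
  | nil => intro b; simp
  | cons y ys ih =>
    intro b
    simp only [List.foldl_cons, List.any_cons, ih]
    by_cases hc : (0 ≤ |PySem.List.pyGetD x 2 0 - PySem.List.pyGetD y 2 0| ∧
        |PySem.List.pyGetD x 2 0 - PySem.List.pyGetD y 2 0| ≤ x_tol ∧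
        PySem.List.pyGetD y 1 0 - y_tol ≤ PySem.List.pyGetD x 1 0 ∧
        PySem.List.pyGetD x 1 0 ≤ PySem.List.pyGetD y 3 0 + y_tol)
    · have h := (pvHit_iff x_tol y_tol y x).mp hc
      rw [if_pos hc]
      simp [h]
    · have h : pvHit x_tol y_tol y x = false := by
        rcases hb : pvHit x_tol y_tol y x with _ | _
        · rfl
        · exact absurd ((pvHit_iff x_tol y_tol y x).mpr hb) hc
      rw [if_neg hc]
      simp [h]

theorem pvA_char (x_lines y_lines : List (List Int)) (x_tol y_tol : Int) :
    findRightDeadEnds x_lines y_lines x_tol y_tol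
      = x_lines.filter (fun x => !(y_lines.any (fun y => pvHit x_tol y_tol y x))) := by
  unfold findRightDeadEnds
  simp only [pvInnerA, Bool.true_and]
  exact (PySem.List.foldl_append_if_eq_filter _ x_lines []).trans (List.nil_append _)

theorem pvZipMapMap {α : Type} (xs : List α) (f g : α → Bool) :
    ((xs.map f).zip xs).map (fun cx => cx.1 || g cx.2) = xs.map (fun x => f x || g x) := by
  induction xs with
  | nil => rfl
  | cons x xs ih => simp [ih]

theorem pvZipFilterMap {α : Type} (xs : List α) (f : α → Bool) :
    ((xs.map f).zip xs).filterMap (fun cx => if cx.1 then none else some cx.2)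
      = xs.filter (fun x => !f x) := by
  induction xs with
  | nil => rfl
  | cons x xs ih =>
    rcases hf : f x with _ | _ <;> simp [hf, ih]

theorem pvCovFold (x_lines : List (List Int)) (x_tol y_tol : Int) :
    ∀ (ys : List (List Int)) (f : List Int → Bool),
      ys.foldl (fun covered y =>
        let xlo := PySem.List.pyGetD y 2 0 - x_tol
        let xhi := PySem.List.pyGetD y 2 0 + x_tol
        let ylo := PySem.List.pyGetD y 1 0 - y_tol
        let yhi := PySem.List.pyGetD y 3 0 + y_tol
        (covered.zip x_lines).map (fun cx =>
          cx.1 || decide (xlo ≤ PySem.List.pyGetD cx.2 2 0 ∧ PySem.List.pyGetD cx.2 2 0 ≤ xhi ∧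
                          ylo ≤ PySem.List.pyGetD cx.2 1 0 ∧ PySem.List.pyGetD cx.2 1 0 ≤ yhi)))
        (x_lines.map f)
      = x_lines.map (fun x => f x || ys.any (fun y => pvHit x_tol y_tol y x)) := by
  intro ys
  induction ys with
  | nil => intro f; simp
  | cons y ys ih =>
    intro f
    rw [List.foldl_cons]
    change List.foldl _
      (((x_lines.map f).zip x_lines).map (fun cx =>
        cx.1 || decide (PySem.List.pyGetD y 2 0 - x_tol ≤ PySem.List.pyGetD cx.2 2 0 ∧
                        PySem.List.pyGetD cx.2 2 0 ≤ PySem.List.pyGetD y 2 0 + x_tol ∧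
                        PySem.List.pyGetD y 1 0 - y_tol ≤ PySem.List.pyGetD cx.2 1 0 ∧
                        PySem.List.pyGetD cx.2 1 0 ≤ PySem.List.pyGetD y 3 0 + y_tol))) ys = _
    rw [pvZipMapMap x_lines f (fun x =>
      decide (PySem.List.pyGetD y 2 0 - x_tol ≤ PySem.List.pyGetD x 2 0 ∧
              PySem.List.pyGetD x 2 0 ≤ PySem.List.pyGetD y 2 0 + x_tol ∧
              PySem.List.pyGetD y 1 0 - y_tol ≤ PySem.List.pyGetD x 1 0 ∧
              PySem.List.pyGetD x 1 0 ≤ PySem.List.pyGetD y 3 0 + y_tol))]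
    show List.foldl _ (x_lines.map (fun x => f x || pvHit x_tol y_tol y x)) ys = _
    rw [ih]
    simp only [List.any_cons, Bool.or_assoc]

theorem pvB_char (x_lines y_lines : List (List Int)) (x_tol y_tol : Int) :
    findRightDeadEnds_alt x_lines y_lines x_tol y_tol
      = x_lines.filter (fun x => !(y_lines.any (fun y => pvHit x_tol y_tol y x))) := by
  unfold findRightDeadEnds_alt
  rw [show List.replicate x_lines.length false = x_lines.map (fun _ => false) from
        (List.map_const').symm]
  rw [pvCovFold]
  rw [pvZipFilterMap]
  simp

-- ===== VERDICT (by name: the statement is the Claim_ definition above) =====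
theorem findRightDeadEnds_spec : Claim_equal_findRightDeadEnds := by
  intro x_lines y_lines x_tol y_tol _ _
  unfold Spec_findRightDeadEnds
  rw [pvA_char, pvB_char]
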